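-- pv_equiv track=rewrite | github.com/reynoldscem/aoc2022 | day_08/part1.py | get_visibility
-- ===== SOURCE A (Python) =====
-- def get_visibility(sequence):
--     visible = [False] * len(sequence)
--     for index, element in enumerate(sequence):
--         left, right = sequence[:index], sequence[index + 1:]
--         edge = not left or not right
--         if edge:
--             visible[index] = True
--             continue
--
--         taller_than_tallest_on_atleast_one_side = (
--             element > min(max(left), max(right))
--         )
--         visible[index] = edge or taller_than_tallest_on_atleast_one_side
--     return visible
-- ===== SOURCE B (Python) =====
-- def get_visibility(sequence):
--     left = []
--     best = None
--     for x in sequence: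
--         left.append(best is None or x > best)
--         if best is None or x > best:
--             best = x
--     right = []
--     best = None
--     for x in reversed(sequence):
--         right.append(best is None or x > best)
--         if best is None or x > best:
--             best = x
--     right.reverse()
--     return [l or r for l, r in zip(left, right)]
-- ===== Notes on version B (the rewrite author's own statement) =====
-- stated objective: faster
-- what changed: A rescans both slices with max() for every index (quadratic); B makes one forward and one backward running-max sweep and ORs the two visibility vectors in a single zip (linear).
import Mathlib
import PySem

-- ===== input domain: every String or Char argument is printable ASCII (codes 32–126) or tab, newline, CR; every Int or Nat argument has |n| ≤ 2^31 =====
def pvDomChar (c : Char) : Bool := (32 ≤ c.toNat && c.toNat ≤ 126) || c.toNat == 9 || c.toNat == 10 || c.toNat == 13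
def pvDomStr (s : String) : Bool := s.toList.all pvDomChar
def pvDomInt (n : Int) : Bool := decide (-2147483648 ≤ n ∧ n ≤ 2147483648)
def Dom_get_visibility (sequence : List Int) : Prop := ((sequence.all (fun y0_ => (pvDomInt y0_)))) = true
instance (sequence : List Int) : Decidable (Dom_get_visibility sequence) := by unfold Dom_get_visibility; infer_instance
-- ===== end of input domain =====

-- B replaces A's per-index slice-and-max rescans by two linear running-max sweeps (objective: faster, asymptotic).

-- ===== PORT A =====
def get_visibility (sequence : List Int) : List Bool :=
  let visible := List.replicate sequence.length false
  (PySem.List.enumerate sequence 0).foldl (fun visible p =>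
    let index := p.1
    let element := p.2
    let left := PySem.List.slice sequence none (some index)
    let right := PySem.List.slice sequence (some (index + 1)) none
    let edge := left.isEmpty || right.isEmpty
    if edge then
      visible.set index.toNat true
    else
      let taller := decide (element >
        min ((PySem.List.max? left (fun y => y)).getD 0)
            ((PySem.List.max? right (fun y => y)).getD 0))
      visible.set index.toNat (edge || taller)) visible

-- ===== PORT B =====
-- one running-max sweep: entry is 'best is None or x > best', best is the running max so far
def scanVis : Option Int → List Int → List Bool
  | _, [] => []
  | none, x :: xs => true :: scanVis (some x) xs
  | some m, x :: xs => decide (x > m) :: scanVis (some (if x > m then x else m)) xs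

def get_visibility_alt (sequence : List Int) : List Bool :=
  let left := scanVis none sequence
  let right := (scanVis none sequence.reverse).reverse
  List.zipWith (fun l r => l || r) left right

-- ===== PRECONDITION & SPEC =====
def Spec_get_visibility (sequence : List Int) (out : List Bool) : Prop := out = get_visibility_alt sequence
instance (sequence : List Int) (out : List Bool) : Decidable (Spec_get_visibility sequence out) := by unfold Spec_get_visibility; infer_instance

-- ===== CLAIM (what is proved, stated in full; the proofs are below) =====
def Claim_equal_get_visibility : Prop := ∀ (sequence : List Int), Dom_get_visibility sequence → Spec_get_visibility sequence (get_visibility sequence)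

-- ===== LEMMAS AND PROOFS =====

-- the value A writes at index `index` for element `element`
def avalF (sequence : List Int) (index : Int) (element : Int) : Bool :=
  let left := PySem.List.slice sequence none (some index)
  let right := PySem.List.slice sequence (some (index + 1)) none
  let edge := left.isEmpty || right.isEmpty
  if edge then true
  else (edge || decide (element >
        min ((PySem.List.max? left (fun y => y)).getD 0)
            ((PySem.List.max? right (fun y => y)).getD 0)))

lemma take_set (l : List Bool) (k : Nat) (v : Bool) (h : k < l.length) :
    (l.set k v).take (k+1) = l.take k ++ [v] := by
  rw [List.set_eq_take_append_cons_drop, if_pos h]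
  rw [show k + 1 = (l.take k).length + 1 by simp; omega]
  rw [List.take_append]
  simp

lemma foldl_set_enum (f : Int → Int → Bool) :
    ∀ (xs : List Int) (k : Nat) (acc : List Bool), acc.length = k + xs.length →
      List.foldl (fun vis (p : Int × Int) => vis.set p.1.toNat (f p.1 p.2)) acc
        (PySem.List.enumerate xs (k : Int)) =
      acc.take k ++ xs.mapIdx (fun j x => f ((k + j : Nat) : Int) x) := by
  intro xs
  induction xs with
  | nil =>
    intro k acc h
    simp only [List.length_nil, Nat.add_zero] at h
    simp [PySem.List.enumerate_nil, List.take_of_length_le (le_of_eq h)]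
  | cons x xs ih =>
    intro k acc h
    rw [PySem.List.enumerate_cons, List.foldl_cons]
    have hk : (k : Int) + 1 = ((k + 1 : Nat) : Int) := by push_cast; ring
    rw [hk, ih (k + 1) _ (by simp at h ⊢; omega)]
    simp only [Int.toNat_natCast]
    rw [take_set _ _ _ (by simp at h ⊢; omega)]
    rw [List.mapIdx_cons, List.append_assoc, List.singleton_append]
    refine congrArg _ ?_
    refine List.cons_eq_cons.mpr ⟨by norm_num, ?_⟩
    have h1 : (fun (j : Nat) (y : Int) => f (((k+1+j : Nat)):Int) y)
        = (fun (i : Nat) (y : Int) => f (((k + (i+1) : Nat)):Int) y) := by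
      funext j y; congr 2; omega
    rw [h1]

lemma get_visibility_eq_mapIdx (sequence : List Int) :
    get_visibility sequence = sequence.mapIdx (fun j x => avalF sequence (j : Int) x) := by
  show List.foldl _ _ _ = _
  have hstep : (fun (visible : List Bool) (p : Int × Int) =>
      let index := p.1
      let element := p.2
      let left := PySem.List.slice sequence none (some index)
      let right := PySem.List.slice sequence (some (index + 1)) none
      let edge := left.isEmpty || right.isEmpty
      if edge then
        visible.set index.toNat true
      else
        let taller := decide (element >
          min ((PySem.List.max? left (fun y => y)).getD 0)
              ((PySem.List.max? right (fun y => y)).getD 0))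
        visible.set index.toNat (edge || taller))
      = (fun (vis : List Bool) (p : Int × Int) => vis.set p.1.toNat (avalF sequence p.1 p.2)) := by
    funext vis p
    simp only [avalF]
    split <;> rfl
  rw [hstep]
  have h0 : (0 : Int) = ((0 : Nat) : Int) := rfl
  rw [h0, foldl_set_enum (fun i e => avalF sequence i e) sequence 0
      (List.replicate sequence.length false) (by simp)]
  simp

lemma length_scanVis : ∀ (o : Option Int) (l : List Int), (scanVis o l).length = l.length := by
  intro o l
  induction l generalizing o with
  | nil => cases o <;> simp [scanVis]
  | cons x xs ih => cases o <;> simp [scanVis, ih]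

lemma gt_foldl_max_iff (x : Int) : ∀ (l : List Int) (m : Int),
    (l.foldl max m < x) ↔ (m < x ∧ ∀ y ∈ l, y < x) := by
  intro l
  induction l with
  | nil => simp
  | cons a t ih =>
    intro m
    rw [List.foldl_cons, ih (max m a)]
    simp
    tauto

lemma scanVis_some : ∀ (xs : List Int) (m : Int),
    scanVis (some m) xs = xs.mapIdx (fun j x => decide ((xs.take j).foldl max m < x)) := by
  intro xs
  induction xs with
  | nil => intro m; simp [scanVis]
  | cons x t ih =>
    intro m
    show decide (x > m) :: scanVis (some (if x > m then x else m)) t = _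
    rw [List.mapIdx_cons]
    have hmax : (if x > m then x else m) = max m x := by
      split <;> omega
    rw [hmax, ih (max m x)]
    refine List.cons_eq_cons.mpr ⟨by simp, ?_⟩
    have h1 : (fun (i : Nat) (y : Int) => decide ((((x :: t).take (i+1)).foldl max m) < y))
        = (fun (j : Nat) (y : Int) => decide (((t.take j).foldl max (max m x)) < y)) := by
      funext j y; simp [List.take_succ_cons]
    rw [h1]

lemma scanVis_none_true_iff (l : List Int) (k : Nat) (hk : k < l.length) :
    ((scanVis none l)[k]'(by rw [length_scanVis]; exact hk) = true) ↔
      ∀ y ∈ l.take k, y < l[k] := by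
  cases l with
  | nil => simp at hk
  | cons a t =>
    show ((true :: scanVis (some a) t)[k]'_ = true) ↔ _
    cases k with
    | zero => simp
    | succ j =>
      have hj : j < t.length := by simpa using hk
      simp only [List.getElem_cons_succ, scanVis_some t a, List.getElem_mapIdx,
        decide_eq_true_iff, List.take_succ_cons, List.forall_mem_cons]
      rw [gt_foldl_max_iff]

-- A's entry, characterised: the element beats everything on at least one side
lemma avalF_true_iff (sequence : List Int) (i : Nat) (hi : i < sequence.length) :
    (avalF sequence (i : Int) (sequence[i]) = true) ↔
      ((∀ y ∈ sequence.take i, y < sequence[i]) ∨ (∀ y ∈ sequence.drop (i+1), y < sequence[i])) := by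
  have hL : PySem.List.slice sequence none (some (i : Int)) = sequence.take i :=
    PySem.List.slice_to_natCast ..
  have hR : PySem.List.slice sequence (some ((i : Int) + 1)) none = sequence.drop (i+1) := by
    rw [show ((i : Int) + 1) = (((i+1 : Nat)) : Int) by push_cast; ring]
    exact PySem.List.slice_from_natCast ..
  unfold avalF
  simp only [hL, hR]
  by_cases hedge : ((sequence.take i).isEmpty || (sequence.drop (i+1)).isEmpty) = true
  · rw [if_pos hedge]
    rcases Bool.or_eq_true_iff.mp hedge with he | he
    · rw [List.isEmpty_iff] at he
      simp [he]
    · rw [List.isEmpty_iff] at he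
      simp [he]
  · rw [if_neg hedge]
    rcases hT : sequence.take i with _ | ⟨a, ta⟩
    · rw [hT] at hedge; simp at hedge
    rcases hD : sequence.drop (i+1) with _ | ⟨b, tb⟩
    · rw [hD] at hedge; simp at hedge
    simp only [List.isEmpty_cons, Bool.or_self, Bool.false_or, decide_eq_true_iff]
    rw [PySem.List.max?_id_cons, PySem.List.max?_id_cons]
    simp only [Option.getD_some, gt_iff_lt, min_lt_iff]
    rw [gt_foldl_max_iff, gt_foldl_max_iff]
    simp only [List.forall_mem_cons]

theorem get_visibility_spec : Claim_equal_get_visibility := by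
  intro sequence _
  show get_visibility sequence = get_visibility_alt sequence
  rw [get_visibility_eq_mapIdx]
  unfold get_visibility_alt
  apply List.ext_getElem
  · simp [length_scanVis]
  · intro i h1 h2
    have hi : i < sequence.length := by simpa using h1
    rw [List.getElem_mapIdx, List.getElem_zipWith]
    rw [Bool.eq_iff_iff]
    rw [avalF_true_iff sequence i hi, Bool.or_eq_true_iff]
    have hleft : ((scanVis none sequence)[i]'(by rw [length_scanVis]; exact hi) = true) ↔
        ∀ y ∈ sequence.take i, y < sequence[i] := scanVis_none_true_iff sequence i hi
    have hk : sequence.length - 1 - i < sequence.reverse.length := by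
      simp; omega
    have hrev : ((scanVis none sequence.reverse).reverse[i]'(by
          rw [List.length_reverse, length_scanVis, List.length_reverse]; exact hi) = true) ↔
        ∀ y ∈ sequence.drop (i+1), y < sequence[i] := by
      rw [List.getElem_reverse]
      have := scanVis_none_true_iff sequence.reverse (sequence.length - 1 - i) hk
      simp only [length_scanVis, List.length_reverse] at this ⊢
      rw [this]
      have hel : sequence.reverse[sequence.length - 1 - i]'(by simp; omega) = sequence[i] := by
        rw [List.getElem_reverse]
        congr 1
        omega
      have htk : sequence.reverse.take (sequence.length - 1 - i) = (sequence.drop (i+1)).reverse := by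
        rw [List.take_reverse]
        congr 2
        omega
      rw [hel, htk]
      constructor
      · intro h y hy
        exact h y (List.mem_reverse.mpr hy)
      · intro h y hy
        exact h y (List.mem_reverse.mp hy)
    rw [hleft, hrev]
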